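-- pv_equiv track=rewrite | github.com/BelisaDi/Proyecto-Logica-2 | HorariosQueFunciona2.py | clausulas
-- ===== SOURCE A (Python) =====
-- def clausulas(formula):
--     clausulasFinales=[]
--     tmp=[]
--     string=""
--     idx=formula.find("*")
--     clausulasFinales.append([formula[1:idx]])
--     for i in formula[idx+1:]:
--         if(i=="+"):
--             tmp.append(string)
--             string=""
--         elif(i=="*" or i=="]"):
--             tmp.append(string)
--             clausulasFinales.append(tmp)
--             string=""
--             tmp=[]
--         elif(i!="(" and i!=")"):
--             string += i
--     return clausulasFinales
-- ===== SOURCE B (Python) =====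
-- def clausulas(formula):
--     idx = formula.find("*")
--     tail = formula[idx+1:].replace("(", "").replace(")", "").replace("]", "*")
--     segs = tail.split("*")[:-1]
--     return [[formula[1:idx]]] + [seg.split("+") for seg in segs]
-- ===== Notes on version B (the rewrite author's own statement) =====
-- stated objective: faster
-- what changed: Replaced the one-pass character state machine (accumulator string, pending clause list, flush on terminators) with a declarative two-level split: strip parens via str.replace, unify ']' with '*', split on '*', drop the unterminated last segment, and split each clause on '+'; the C-level replace/split loops beat A's per-character Python loop.
import Mathlib
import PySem

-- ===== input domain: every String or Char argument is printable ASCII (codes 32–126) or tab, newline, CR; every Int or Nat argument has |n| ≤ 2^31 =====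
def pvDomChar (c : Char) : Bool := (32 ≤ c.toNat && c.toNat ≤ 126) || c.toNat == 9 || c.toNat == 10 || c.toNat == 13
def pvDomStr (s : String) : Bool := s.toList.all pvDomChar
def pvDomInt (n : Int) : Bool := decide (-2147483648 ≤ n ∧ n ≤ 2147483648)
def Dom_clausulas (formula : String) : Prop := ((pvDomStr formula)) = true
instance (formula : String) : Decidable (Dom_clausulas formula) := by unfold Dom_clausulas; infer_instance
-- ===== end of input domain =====

-- B replaces A's one-pass character state machine by a two-level replace/split decomposition (measured constant-factor faster; C-level string ops instead of a per-character Python loop).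

-- ===== PORT A =====
-- the body of A's for-loop, step for step (string accumulated as List Char, materialised on flush)
def clausulasStep (st : List (List String) × List String × List Char) (i : Char) :
    List (List String) × List String × List Char :=
  if i == '+' then (st.1, st.2.1 ++ [String.ofList st.2.2], [])
  else if i == '*' || i == ']' then (st.1 ++ [st.2.1 ++ [String.ofList st.2.2]], [], [])
  else if i != '(' && i != ')' then (st.1, st.2.1, st.2.2 ++ [i])
  else st

def clausulas (formula : String) : List (List String) :=
  let idx := PySem.Str.find formula "*"
  let clausulasFinales : List (List String) := [[PySem.Str.slice formula (some 1) (some idx)]]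
  let tail := PySem.Str.slice formula (some (idx + 1)) none
  (tail.toList.foldl clausulasStep (clausulasFinales, [], [])).1

-- ===== PORT B =====
def clausulas_alt (formula : String) : List (List String) :=
  let idx := PySem.Str.find formula "*"
  let tail := PySem.Str.replace (PySem.Str.replace (PySem.Str.replace
      (PySem.Str.slice formula (some (idx + 1)) none) "(" "") ")" "") "]" "*"
  -- tail.split("*")[:-1]; each seg.split("+")  (Chars.splitOn is PySem's str.split for a nonempty sep)
  let segs := (PySem.Chars.splitOn tail.toList ['*']).dropLast
  [PySem.Str.slice formula (some 1) (some idx)] ::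
    segs.map (fun seg => (PySem.Chars.splitOn seg ['+']).map String.ofList)

-- ===== PRECONDITION & SPEC =====
def Spec_clausulas (formula : String) (out : List (List String)) : Prop := out = clausulas_alt formula
instance (formula : String) (out : List (List String)) : Decidable (Spec_clausulas formula out) := by unfold Spec_clausulas; infer_instance

-- ===== CLAIM (what is proved, stated in full; the proofs are below) =====
def Claim_equal_clausulas : Prop := ∀ (formula : String), Dom_clausulas formula → Spec_clausulas formula (clausulas formula)

-- ===== LEMMAS AND PROOFS =====

-- a single-char split, the spine of both the state machine and splitOn
def mySplit (sep : Char) : List Char → List (List Char)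
  | [] => [[]]
  | c :: t => if c = sep then [] :: mySplit sep t else (mySplit sep t).modifyHead (c :: ·)

theorem mySplit_ex (sep : Char) (l : List Char) : ∃ h r, mySplit sep l = h :: r := by
  induction l with
  | nil => exact ⟨[], [], rfl⟩
  | cons c t ih =>
    obtain ⟨h, r, hm⟩ := ih
    by_cases hc : c = sep
    · exact ⟨[], mySplit sep t, by simp [mySplit, hc]⟩
    · exact ⟨c :: h, r, by simp [mySplit, hc, hm]⟩

theorem splitOn_go_eq (sep : Char) (l cur : List Char) (acc : List (List Char)) (fuel : Nat)
    (hf : l.length ≤ fuel) :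
    PySem.Chars.splitOn.go [sep] fuel l cur acc
      = acc.reverse ++ (mySplit sep l).modifyHead (cur.reverse ++ ·) := by
  induction l generalizing cur acc fuel with
  | nil => cases fuel <;> simp [PySem.Chars.splitOn.go, mySplit]
  | cons c t ih =>
    cases fuel with
    | zero => simp at hf
    | succ f =>
      simp only [List.length_cons, Nat.succ_le_succ_iff] at hf
      by_cases hc : c = sep
      · have hpre : List.isPrefixOf [sep] (c :: t) = true := by simp [List.isPrefixOf, hc]
        rw [PySem.Chars.splitOn.go, if_pos hpre]
        have hd : List.drop [sep].length (c :: t) = t := by simp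
        rw [hd, ih _ _ _ hf]
        obtain ⟨h, r, hm⟩ := mySplit_ex sep t
        simp [mySplit, hc, hm]
      · have hpre : List.isPrefixOf [sep] (c :: t) = false := by
          simp [List.isPrefixOf, Ne.symm hc]
        rw [PySem.Chars.splitOn.go, if_neg (by simp [hpre])]
        rw [ih _ _ _ hf]
        obtain ⟨h, r, hm⟩ := mySplit_ex sep t
        simp [mySplit, hc, hm]

theorem splitOn_eq_mySplit (sep : Char) (l : List Char) :
    PySem.Chars.splitOn l [sep] = mySplit sep l := by
  rw [PySem.Chars.splitOn, splitOn_go_eq sep l [] [] (l.length + 1) (by omega)]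
  obtain ⟨h, r, hm⟩ := mySplit_ex sep l
  simp [hm]

theorem replace_go_eq (c : Char) (new l acc : List Char) (fuel : Nat) (hf : l.length ≤ fuel) :
    PySem.Chars.replace.go [c] new fuel l acc
      = acc.reverse ++ l.flatMap (fun x => if x = c then new else [x]) := by
  induction l generalizing acc fuel with
  | nil => cases fuel <;> simp [PySem.Chars.replace.go]
  | cons x t ih =>
    cases fuel with
    | zero => simp at hf
    | succ f =>
      simp only [List.length_cons, Nat.succ_le_succ_iff] at hf
      by_cases hx : x = c
      · have hpre : List.isPrefixOf [c] (x :: t) = true := by simp [List.isPrefixOf, hx]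
        rw [PySem.Chars.replace.go, if_pos hpre]
        have hd : List.drop [c].length (x :: t) = t := by simp
        rw [hd, ih _ _ hf]
        simp [hx]
      · have hpre : List.isPrefixOf [c] (x :: t) = false := by
          simp [List.isPrefixOf, Ne.symm hx]
        rw [PySem.Chars.replace.go, if_neg (by simp [hpre])]
        rw [ih _ _ hf]
        simp [hx]

theorem replace_single (c : Char) (new l : List Char) :
    PySem.Chars.replace l [c] new = l.flatMap (fun x => if x = c then new else [x]) := by
  rw [PySem.Chars.replace, if_neg (by simp), replace_go_eq c new l [] l.length (le_refl _)]
  simp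

-- the normalisation B's replace chain performs: drop parens, rename ']' to '*'
def normChars (l : List Char) : List Char :=
  (l.filter (fun c => !(c == '(') && !(c == ')'))).map (fun c => if c = ']' then '*' else c)

theorem replace_chain_eq (l : List Char) :
    PySem.Chars.replace (PySem.Chars.replace (PySem.Chars.replace l ['('] []) [')'] []) [']'] ['*']
      = normChars l := by
  simp only [replace_single]
  induction l with
  | nil => rfl
  | cons c t ih =>
    by_cases h1 : c = '(' <;> by_cases h2 : c = ')' <;> by_cases h3 : c = ']' <;>
      simp_all [normChars]

theorem mySplit_no_sep (sep : Char) (s : List Char) (hs : sep ∉ s) :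
    mySplit sep s = [s] := by
  induction s with
  | nil => rfl
  | cons c t ih =>
    simp only [List.mem_cons, not_or] at hs
    simp [mySplit, Ne.symm hs.1, ih hs.2]

theorem mySplit_append_sep (sep : Char) (s u : List Char) (hs : sep ∉ s) :
    mySplit sep (s ++ sep :: u) = s :: mySplit sep u := by
  induction s with
  | nil => simp [mySplit]
  | cons c t ih =>
    simp only [List.mem_cons, not_or] at hs
    simp [mySplit, Ne.symm hs.1, ih hs.2]

-- what the tail of A's loop contributes, phrased on B's split decomposition
def clauseOf (seg : List Char) : List String := (mySplit '+' seg).map String.ofList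
def tailClauses (tmp : List String) (s : List Char) (m : List Char) : List (List String) :=
  let segs := mySplit '*' m
  if segs.tail = [] then []
  else (tmp ++ clauseOf (s ++ segs.headD [])) :: segs.tail.dropLast.map clauseOf

theorem foldl_step_eq (l : List Char) (fin : List (List String)) (tmp : List String)
    (s : List Char) (hs : '+' ∉ s) :
    (l.foldl clausulasStep (fin, tmp, s)).1 = fin ++ tailClauses tmp s (normChars l) := by
  induction l generalizing fin tmp s with
  | nil => simp [tailClauses, mySplit, normChars]
  | cons c t ih =>
    by_cases h1 : c = '+'
    · subst h1
      rw [List.foldl_cons]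
      have : clausulasStep (fin, tmp, s) '+' = (fin, tmp ++ [String.ofList s], []) := by
        simp [clausulasStep]
      rw [this, ih _ _ _ (by simp)]
      have hnc : normChars ('+' :: t) = '+' :: normChars t := by simp [normChars]
      rw [hnc]
      obtain ⟨h, r, hm⟩ := mySplit_ex '*' (normChars t)
      have hsplit : mySplit '*' ('+' :: normChars t) = ('+' :: h) :: r := by
        simp [mySplit, hm]
      rcases r with _ | ⟨r0, rs⟩
      · simp [tailClauses, hm, hsplit]
      · simp [tailClauses, hm, hsplit, clauseOf, mySplit_append_sep '+' s h hs]
    · by_cases h2 : c = '*' ∨ c = ']'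
      · rw [List.foldl_cons]
        have hst : clausulasStep (fin, tmp, s) c
            = (fin ++ [tmp ++ [String.ofList s]], [], []) := by
          rcases h2 with h2 | h2 <;> simp [clausulasStep, h2]
        rw [hst, ih _ _ _ (by simp)]
        have hnc : normChars (c :: t) = '*' :: normChars t := by
          rcases h2 with h2 | h2 <;> simp [normChars, h2]
        rw [hnc]
        obtain ⟨h, r, hm⟩ := mySplit_ex '*' (normChars t)
        have hsplit : mySplit '*' ('*' :: normChars t) = [] :: h :: r := by
          simp [mySplit, hm]
        rcases r with _ | ⟨r0, rs⟩
        · simp [tailClauses, hm, hsplit, clauseOf, mySplit_no_sep '+' s hs]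
        · simp [tailClauses, hm, hsplit, clauseOf, mySplit_no_sep '+' s hs]
      · push_neg at h2
        by_cases h3 : c = '(' ∨ c = ')'
        · rw [List.foldl_cons]
          have hst : clausulasStep (fin, tmp, s) c = (fin, tmp, s) := by
            rcases h3 with h3 | h3 <;> simp [clausulasStep, h3]
          rw [hst, ih _ _ _ hs]
          have hnc : normChars (c :: t) = normChars t := by
            rcases h3 with h3 | h3 <;> simp [normChars, h3]
          rw [hnc]
        · push_neg at h3
          rw [List.foldl_cons]
          have hst : clausulasStep (fin, tmp, s) c = (fin, tmp, s ++ [c]) := by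
            simp [clausulasStep, h1, h2.1, h2.2, h3.1, h3.2]
          rw [hst, ih _ _ _ (by simp [hs, Ne.symm h1])]
          have hnc : normChars (c :: t) = c :: normChars t := by
            simp [normChars, h3.1, h3.2, h2.2]
          rw [hnc]
          obtain ⟨h, r, hm⟩ := mySplit_ex '*' (normChars t)
          have hsplit : mySplit '*' (c :: normChars t) = (c :: h) :: r := by
            simp [mySplit, h2.1, hm]
          rcases r with _ | ⟨r0, rs⟩
          · simp [tailClauses, hm, hsplit]
          · simp [tailClauses, hm, hsplit, clauseOf]

theorem tailClauses_nil_nil (m : List Char) :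
    tailClauses [] [] m = (mySplit '*' m).dropLast.map clauseOf := by
  obtain ⟨h, r, hm⟩ := mySplit_ex '*' m
  simp only [tailClauses, hm]
  rcases r with _ | ⟨r0, rs⟩
  · simp
  · simp

-- ===== VERDICT (by name: the statement is the Claim_ definition above) =====
theorem clausulas_spec : Claim_equal_clausulas := by
  intro formula _
  unfold Spec_clausulas clausulas clausulas_alt
  simp only [PySem.Str.toList_replace]
  rw [foldl_step_eq _ _ _ _ (by simp)]
  simp only [show "(".toList = ['('] from rfl, show ")".toList = [')'] from rfl,
    show "]".toList = [']'] from rfl, show "*".toList = ['*'] from rfl,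
    show "".toList = ([] : List Char) from rfl]
  rw [replace_chain_eq, splitOn_eq_mySplit, tailClauses_nil_nil]
  have hco : (fun seg => List.map String.ofList (mySplit '+' seg)) = clauseOf := rfl
  simp [splitOn_eq_mySplit, hco]
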